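-- pv_equiv track=rewrite | github.com/komnor/combined_codes | closest_to_zero.py | closest_to_zero
-- ===== SOURCE A (Python) =====
-- def closest_to_zero(numbers):
--     # Separate the positive and negative numbers into two lists
--     pos = [n for n in numbers if n > 0]
--     neg = [n for n in numbers if n < 0]
--
--     # If there are equal numbers of positive and negative numbers in the list,
--     # select the negative and positive numbers whose absolute values are closest
--     # to each other
--     if len(pos) == len(neg):
--         # Find the absolute difference between each pair of positive and negative
--         # numbers and select the pair with the smallest difference
--         closest = min([abs(p - n) for p in pos for n in neg])
--         # Square each number in the selected pair and return them in a list
--         return [p ** 2 for p in pos + neg if abs(p - closest) < 1e-9]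
--
--     # If there are more positive numbers than negative numbers in the list,
--     # select the positive number whose absolute value is closest to any of the
--     # negative numbers
--     elif len(pos) > len(neg):
--         # Find the absolute difference between each positive number and each
--         # negative number and select the smallest difference
--         closest = min([abs(p - n) for p in pos for n in neg])
--         # Square the positive number with the smallest absolute difference to
--         # any of the negative numbers and return it in a list
--         return [p ** 2 for p in pos if abs(p - closest) < 1e-9]
--
--     # If there are more negative numbers than positive numbers in the list,
--     # select the negative number whose absolute value is closest to any of the
--     # positive numbers
--     else:
--         # Find the absolute difference between each negative number and each
--         # positive number and select the smallest difference
--         closest = min([abs(p - n) for p in pos for n in neg])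
--         # Square the negative number with the smallest absolute difference to
--         # any of the positive numbers and return it in a list
--         return [n ** 2 for n in neg if abs(n - closest) < 1e-9]
-- ===== SOURCE B (Python) =====
-- def closest_to_zero(numbers):
--     # One pass to split; since every p > 0 and n < 0, abs(p - n) = p - n,
--     # so the minimal pairwise difference is simply min(pos) - max(neg).
--     pos, neg = [], []
--     for x in numbers:
--         if x > 0:
--             pos.append(x)
--         elif x < 0:
--             neg.append(x)
--     closest = min(pos) - max(neg)
--     if len(pos) == len(neg):
--         cand = pos + neg
--     elif len(pos) > len(neg):
--         cand = pos
--     else: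
--         cand = neg
--     return [x * x for x in cand if x == closest]
-- ===== Notes on version B (the rewrite author's own statement) =====
-- stated objective: faster
-- what changed: B replaces A's quadratic minimum over all positive/negative pairs by the closed form min(pos) - max(neg) (valid because p>0 and n<0 make abs(p-n)=p-n), splits the list in one pass and filters with exact integer equality instead of the 1e-9 float tolerance.
import Mathlib
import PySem

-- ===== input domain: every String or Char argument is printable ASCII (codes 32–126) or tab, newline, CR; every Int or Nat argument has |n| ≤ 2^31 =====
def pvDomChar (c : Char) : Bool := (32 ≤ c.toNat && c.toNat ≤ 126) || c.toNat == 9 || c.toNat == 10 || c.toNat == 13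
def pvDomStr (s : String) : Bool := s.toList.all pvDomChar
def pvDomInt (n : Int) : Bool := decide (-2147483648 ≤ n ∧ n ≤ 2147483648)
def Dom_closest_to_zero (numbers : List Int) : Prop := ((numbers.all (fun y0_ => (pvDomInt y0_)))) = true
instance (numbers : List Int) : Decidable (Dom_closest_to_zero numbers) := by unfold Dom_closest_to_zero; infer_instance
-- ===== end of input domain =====

-- B computes the minimal pairwise difference as min(pos) - max(neg) in one pass
-- instead of A's minimum over all positive/negative pairs (objective: faster, asymptotic).

-- ===== PORT A =====
-- A's comparison 'abs(p - closest) < 1e-9' has Int operands: an integer's absolute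
-- value is < 1e-9 iff it is < 1, so '|p - closest| < 1' is an exact port.
def closest_to_zero (numbers : List Int) : List Int :=
  let pos := numbers.filter (fun n => decide (n > 0))
  let neg := numbers.filter (fun n => decide (n < 0))
  if pos.length == neg.length then
    match PySem.List.min? (pos.flatMap (fun p => neg.map (fun n => |p - n|))) (fun x => x) with
    | none => []  -- Python raises ValueError here (min of empty list); excluded by Pre_
    | some closest => ((pos ++ neg).filter (fun p => decide (|p - closest| < 1))).map (fun p => p ^ 2)
  else if pos.length > neg.length then
    match PySem.List.min? (pos.flatMap (fun p => neg.map (fun n => |p - n|))) (fun x => x) with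
    | none => []
    | some closest => (pos.filter (fun p => decide (|p - closest| < 1))).map (fun p => p ^ 2)
  else
    match PySem.List.min? (pos.flatMap (fun p => neg.map (fun n => |p - n|))) (fun x => x) with
    | none => []
    | some closest => (neg.filter (fun n => decide (|n - closest| < 1))).map (fun n => n ^ 2)

-- ===== PORT B =====
def closest_to_zero_alt (numbers : List Int) : List Int :=
  let pn := numbers.foldl
    (fun (pn : List Int × List Int) x =>
      if x > 0 then (pn.1 ++ [x], pn.2)
      else if x < 0 then (pn.1, pn.2 ++ [x])
      else pn) ([], [])
  let pos := pn.1
  let neg := pn.2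
  match PySem.List.min? pos (fun x => x), PySem.List.max? neg (fun x => x) with
  | some mp, some mn =>
    let closest := mp - mn
    let cand :=
      if pos.length == neg.length then pos ++ neg
      else if pos.length > neg.length then pos
      else neg
    (cand.filter (fun x => x == closest)).map (fun x => x * x)
  | _, _ => []  -- Python raises ValueError here; excluded by Pre_

-- ===== PRECONDITION & SPEC =====
-- Pre_ excludes exactly the inputs with no positive or no negative element,
-- where both A and B raise ValueError on min()/max() of an empty list.
def Pre_closest_to_zero (numbers : List Int) : Prop :=
  (∃ x ∈ numbers, 0 < x) ∧ (∃ x ∈ numbers, x < 0)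
instance (numbers : List Int) : Decidable (Pre_closest_to_zero numbers) := by
  unfold Pre_closest_to_zero; infer_instance
def pvWitness_closest_to_zero : List Int := [3, -1, 2]

def Spec_closest_to_zero (numbers : List Int) (out : List Int) : Prop := out = closest_to_zero_alt numbers
instance (numbers : List Int) (out : List Int) : Decidable (Spec_closest_to_zero numbers out) := by unfold Spec_closest_to_zero; infer_instance

-- ===== CLAIM (what is proved, stated in full; the proofs are below) =====
def Claim_equal_closest_to_zero : Prop := ∀ (numbers : List Int), Dom_closest_to_zero numbers → Pre_closest_to_zero numbers → Spec_closest_to_zero numbers (closest_to_zero numbers)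

-- ===== LEMMAS AND PROOFS =====

-- B's one-pass split equals A's two filters.
theorem pv_split (l : List Int) (a b : List Int) :
    l.foldl
      (fun (pn : List Int × List Int) x =>
        if x > 0 then (pn.1 ++ [x], pn.2)
        else if x < 0 then (pn.1, pn.2 ++ [x])
        else pn) (a, b)
    = (a ++ l.filter (fun n => decide (n > 0)), b ++ l.filter (fun n => decide (n < 0))) := by
  induction l generalizing a b with
  | nil => simp
  | cons x t ih =>
    simp only [List.foldl_cons, List.filter_cons]
    rcases lt_trichotomy x 0 with h | h | h
    · have h1 : ¬ x > 0 := by omega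
      simp [h1, h, ih]
    · subst h; simp [ih]
    · simp [h, le_of_lt h, ih]

-- The minimum of all pairwise |p - n| is min(pos) - max(neg) when all p > 0, all n < 0.
theorem pv_min_diffs (pos neg : List Int)
    (hp : ∀ p ∈ pos, 0 < p) (hn : ∀ n ∈ neg, n < 0)
    (mp mn : Int)
    (hmp : PySem.List.min? pos (fun x => x) = some mp)
    (hmn : PySem.List.max? neg (fun x => x) = some mn) :
    PySem.List.min? (pos.flatMap (fun p => neg.map (fun n => |p - n|))) (fun x => x)
      = some (mp - mn) := by
  have hmpm : mp ∈ pos := PySem.List.min?_mem hmp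
  have hmnm : mn ∈ neg := PySem.List.max?_mem hmn
  have hmpmin : ∀ y ∈ pos, mp ≤ y := PySem.List.min?_isMin hmp
  have hmnmax : ∀ y ∈ neg, y ≤ mn := PySem.List.max?_isMax hmn
  set diffs := pos.flatMap (fun p => neg.map (fun n => |p - n|)) with hd
  have hmem : (mp - mn) ∈ diffs := by
    rw [hd]
    refine List.mem_flatMap.mpr ⟨mp, hmpm, List.mem_map.mpr ⟨mn, hmnm, ?_⟩⟩
    have h1 := hp mp hmpm; have h2 := hn mn hmnm
    show |mp - mn| = mp - mn
    exact abs_of_pos (by omega)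
  have hlow : ∀ d ∈ diffs, mp - mn ≤ d := by
    intro d hdm
    rw [hd] at hdm
    obtain ⟨p, hpm, hdm⟩ := List.mem_flatMap.mp hdm
    obtain ⟨n, hnm, rfl⟩ := List.mem_map.mp hdm
    have := hp p hpm; have := hn n hnm
    have h1 := hmpmin p hpm; have h2 := hmnmax n hnm
    rw [abs_of_pos (by omega : (0:Int) < p - n)]
    omega
  cases hc : PySem.List.min? diffs (fun x => x) with
  | none =>
    exact absurd ((PySem.List.min?_eq_none_iff diffs _).mp hc ▸ hmem) (List.not_mem_nil)
  | some c =>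
    have hcm : c ∈ diffs := PySem.List.min?_mem hc
    have hcmin : ∀ y ∈ diffs, c ≤ y := PySem.List.min?_isMin hc
    have : c = mp - mn := le_antisymm (hcmin _ hmem) (hlow c hcm)
    rw [this]

-- The two filter/map bodies agree: for integers |x - c| < 1 ↔ x = c, and x^2 = x*x.
theorem pv_body (l : List Int) (c : Int) :
    List.map (fun p => p ^ 2) (List.filter (fun p => decide (p - c = 0)) l)
      = List.map (fun x => x * x) (List.filter (fun x => x == c) l) := by
  have h1 : (fun p : Int => decide (p - c = 0)) = (fun x : Int => x == c) := by
    funext x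
    simp [sub_eq_zero, beq_eq_decide]
  rw [h1]
  exact List.map_congr_left (fun x _ => by ring)

-- ===== VERDICT (by name: the statement is the Claim_ definition above) =====
theorem closest_to_zero_spec : Claim_equal_closest_to_zero := by
  intro numbers _ hpre
  obtain ⟨hpos, hneg⟩ := hpre
  unfold Spec_closest_to_zero closest_to_zero closest_to_zero_alt
  simp only [pv_split, List.nil_append]
  set pos := numbers.filter (fun n => decide (n > 0)) with hposdef
  set neg := numbers.filter (fun n => decide (n < 0)) with hnegdef
  have hpne : pos ≠ [] := by
    obtain ⟨x, hx, hx0⟩ := hpos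
    intro h
    have : x ∈ pos := List.mem_filter.mpr ⟨hx, by simpa using hx0⟩
    simp [h] at this
  have hnne : neg ≠ [] := by
    obtain ⟨x, hx, hx0⟩ := hneg
    intro h
    have : x ∈ neg := List.mem_filter.mpr ⟨hx, by simpa using hx0⟩
    simp [h] at this
  have hp : ∀ p ∈ pos, 0 < p := fun p hpm => by
    have := (List.mem_filter.mp hpm).2; simpa using this
  have hn : ∀ n ∈ neg, n < 0 := fun n hnm => by
    have := (List.mem_filter.mp hnm).2; simpa using this
  obtain ⟨mp, hmp⟩ := Option.ne_none_iff_exists'.mp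
    (fun h => hpne ((PySem.List.min?_eq_none_iff pos (fun x : Int => x)).mp h))
  obtain ⟨mn, hmn⟩ := Option.ne_none_iff_exists'.mp
    (fun h => hnne ((PySem.List.max?_eq_none_iff neg (fun x : Int => x)).mp h))
  rw [hmp, hmn, pv_min_diffs pos neg hp hn mp mn hmp hmn]
  by_cases h1 : pos.length = neg.length
  · simp [h1]
    rw [pv_body, pv_body]
  · by_cases h2 : pos.length > neg.length
    · simp [h1, h2]
      rw [pv_body]
    · simp [h1, h2]
      rw [pv_body]
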